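-- pv_equiv track=rewrite | github.com/unboxing96/ALGO | 프로그래머스/solve/N진수_게임.py | solution
-- ===== SOURCE A (Python) =====
-- hex = {
--     10: "A",
--     11: "B",
--     12: "C",
--     13: "D",
--     14: "E",
--     15: "F",
-- }
--
-- def transfer(n, k):
--     # 0 예외 처리
--     if k == 0:
--         return 0
--
--     s = ""
--     while k:
--         s += hex.get(k % n, str(k % n))
--         k //= n
--     return s[::-1]
--
-- def solution(n, t, m, p):
--     loop = ""
--     k = t * m
--     for i in range(k + 1):
--         loop += str(transfer(n, i))
--
--     result = ""
--     for j in range(p - 1, len(loop), m):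
--         result += loop[j]
--
--     return result[:t]
-- ===== SOURCE B (Python) =====
-- DIGITS = "0123456789ABCDEF"
--
--
-- def _digits(n, i):
--     # base-n representation of i, most-significant digit first
--     return ("" if i < n else _digits(n, i // n)) + DIGITS[i % n]
--
--
-- def solution(n, t, m, p):
--     if t <= 0:
--         return ""
--     res = []
--     pos = 0  # global position in the digit stream 0,1,2,...,t*m
--     for i in range(t * m + 1):
--         for ch in _digits(n, i):
--             if pos >= p - 1 and (pos - (p - 1)) % m == 0:
--                 res.append(ch)
--                 if len(res) == t:
--                     return "".join(res)
--             pos += 1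
--     return "".join(res)
-- ===== Notes on version B (the rewrite author's own statement) =====
-- stated objective: alternative
-- what changed: B replaces A's two-pass pipeline (build the whole concatenated digit string for 0..t*m with a dict-driven build-reversed-string per number, then stride over it and truncate) by a single streaming pass: digits of 0,1,...,t*m are produced most-significant-first by recursion over i//n with a digit-table string, flow past a global position counter, and each hit at positions p-1, p-1+m, ... is appended with an early return once t characters are collected, so the full concatenated string is never materialised.
-- outside the precondition, e.g. on solution(20, 17, 1, 1): A returns '0123456789ABCDEF6', B raises IndexError; on solution(2, 1, 2, 0): A returns '0', B returns '1'; on solution(2, -1, -20, 1): A returns '', B returns ''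
import Mathlib
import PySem

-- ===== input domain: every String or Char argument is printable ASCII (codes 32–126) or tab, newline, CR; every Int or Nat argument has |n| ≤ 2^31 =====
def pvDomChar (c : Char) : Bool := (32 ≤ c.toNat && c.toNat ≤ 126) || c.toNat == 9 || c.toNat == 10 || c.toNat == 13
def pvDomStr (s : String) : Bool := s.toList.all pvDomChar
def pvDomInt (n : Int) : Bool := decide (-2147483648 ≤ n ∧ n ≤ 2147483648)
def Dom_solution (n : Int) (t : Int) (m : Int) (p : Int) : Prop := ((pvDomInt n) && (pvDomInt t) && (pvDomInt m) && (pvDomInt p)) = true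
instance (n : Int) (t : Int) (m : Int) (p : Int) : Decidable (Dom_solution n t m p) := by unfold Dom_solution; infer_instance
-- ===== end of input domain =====

-- B replaces A's build-whole-string-then-stride pipeline by one streaming pass that collects
-- the characters at positions p-1, p-1+m, ... as the digits of 0,1,2,... flow by (objective: alternative).

-- ===== PORT A =====
-- hex.get(d, str(d)) for the digit d
def pvDigA (d : Int) : List Char :=
  if d = 10 then ['A'] else if d = 11 then ['B'] else if d = 12 then ['C']
  else if d = 13 then ['D'] else if d = 14 then ['E'] else if d = 15 then ['F']
  else PySem.Int.toChars d

-- the 'while k:' loop of transfer; fuel k.toNat bounds the iteration count on every input A returns on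
def pvTransferLoop (n : Int) : Nat → Int → List Char → List Char
  | 0, _, s => s
  | fuel+1, k, s =>
      if k = 0 then s
      else pvTransferLoop n fuel (PySem.Int.floordiv k n) (s ++ pvDigA (PySem.Int.mod k n))

-- str(transfer(n, k)): the k == 0 branch returns the int 0, which solution turns into "0";
-- s[::-1] is List.reverse (PySem.List.slice?_none_none_neg_one)
def pvTransferA (n k : Int) : List Char :=
  if k = 0 then PySem.Int.toChars 0
  else (pvTransferLoop n k.toNat k []).reverse

def solution (n : Int) (t : Int) (m : Int) (p : Int) : String :=
  let k := t * m
  let loop : List Char :=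
    (PySem.List.pyRange 0 (k + 1) 1).foldl (fun acc i => acc ++ pvTransferA n i) []
  let result : List Char :=
    (PySem.List.pyRange (p - 1) (PySem.List.len loop) m).foldl
      (fun acc j => acc ++ (match PySem.List.pyGet? loop j with
                            | some c => [c]
                            | none => [])) []   -- none = IndexError, excluded by Pre_
  String.ofList (PySem.List.slice result none (some t))

-- ===== PORT B =====
-- DIGITS[d]; none = IndexError (unreachable under Pre_)
def pvDigB (d : Int) : List Char :=
  match PySem.List.pyGet? "0123456789ABCDEF".toList d with
  | some c => [c]
  | none => []

-- _digits(n, i) = ("" if i < n else _digits(n, i // n)) + DIGITS[i % n]; fuel i.toNat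
def pvDigitsB (n : Int) : Nat → Int → List Char
  | 0, i => pvDigB (PySem.Int.mod i n)
  | fuel+1, i =>
      (if i < n then [] else pvDigitsB n fuel (PySem.Int.floordiv i n)) ++ pvDigB (PySem.Int.mod i n)

-- the inner 'for ch in _digits(n, i)' loop: Sum.inl = early return, Sum.inr = carry on
def pvConsume (t q m : Int) : List Char → List Char → Int → (List Char) ⊕ (List Char × Int)
  | [], res, pos => Sum.inr (res, pos)
  | c :: cs, res, pos =>
      if q ≤ pos ∧ PySem.Int.mod (pos - q) m = 0 then
        if ((res.length : Int) + 1 = t) then Sum.inl (res ++ [c])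
        else pvConsume t q m cs (res ++ [c]) (pos + 1)
      else pvConsume t q m cs res (pos + 1)

-- the 'for i in range(t*m+1)' loop; fuel (t*m+1).toNat is exactly its iteration count
def pvStream (n t q m : Int) : Nat → Int → List Char → Int → List Char
  | 0, _, res, _ => res
  | fuel+1, i, res, pos =>
      match pvConsume t q m (pvDigitsB n i.toNat i) res pos with
      | Sum.inl final => final
      | Sum.inr (res', pos') => pvStream n t q m fuel (i + 1) res' pos'

def solution_alt (n : Int) (t : Int) (m : Int) (p : Int) : String :=
  if t ≤ 0 then "" else String.ofList (pvStream n t (p - 1) m (t * m + 1).toNat 0 [] 0)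

-- ===== PRECONDITION & SPEC =====
-- Pre_ is the puzzle's natural domain (base 2..16 — or any base while only single-character
-- digits occur, t*m ≤ 15 —, your 1-based turn p among m players), plus the degenerate t ≤ 0
-- inputs on which A returns "" without raising.  Outside Pre_ A raises or diverges (n ∈ {0, 1},
-- m = 0, out-of-range stride indices) or returns an accidental value B does not reproduce:
-- reversed multi-character decimal "digits" once a base-n digit exceeds 15, negative-index
-- wraparound for p ≤ 0, and an empty string for p > m or m < 0 where the stride never lands
-- inside the built string.
def Pre_solution (n : Int) (t : Int) (m : Int) (p : Int) : Prop :=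
  (1 ≤ t ∧ 2 ≤ n ∧ 1 ≤ m ∧ 1 ≤ p ∧ (n ≤ 16 ∨ t * m ≤ 15))
  ∨ (1 ≤ t ∧ m ≤ -1 ∧ p ≤ 1)
  ∨ (t = 0 ∧ ((1 ≤ m ∧ 0 ≤ p) ∨ (m ≤ -1 ∧ p ≤ 2)))
  ∨ (t < 0 ∧ ((1 ≤ m ∧ 1 ≤ p) ∨ (m ≤ -1 ∧ p ≤ 1 ∧ (n ≤ -2 ∨ 2 ≤ n) ∧ t * m ≤ 15)))
instance (n : Int) (t : Int) (m : Int) (p : Int) : Decidable (Pre_solution n t m p) := by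
  unfold Pre_solution; infer_instance

def pvWitness_solution : Int × Int × Int × Int := (16, 3, 4, 2)

def Spec_solution (n : Int) (t : Int) (m : Int) (p : Int) (out : String) : Prop := out = solution_alt n t m p
instance (n : Int) (t : Int) (m : Int) (p : Int) (out : String) : Decidable (Spec_solution n t m p out) := by unfold Spec_solution; infer_instance

-- ===== CLAIM (what is proved, stated in full; the proofs are below) =====
def Claim_equal_solution : Prop := ∀ (n : Int) (t : Int) (m : Int) (p : Int), Dom_solution n t m p → Pre_solution n t m p → Spec_solution n t m p (solution n t m p)

-- ===== LEMMAS AND PROOFS =====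

-- the characters of L at the positions ≥ q congruent to q mod m, scanning from global position pos
def pvSel (q m : Int) : List Char → Int → List Char
  | [], _ => []
  | c :: cs, pos =>
      (if q ≤ pos ∧ PySem.Int.mod (pos - q) m = 0 then [c] else []) ++ pvSel q m cs (pos + 1)

-- chunk list processed by pvStream with the given fuel, starting at number i
def pvChunks (n : Int) : Nat → Int → List Char
  | 0, _ => []
  | fuel+1, i => pvDigitsB n i.toNat i ++ pvChunks n fuel (i + 1)

lemma pvDigA_eq_digB (d : Int) (h0 : 0 ≤ d) (h16 : d < 16) : pvDigA d = pvDigB d := by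
  interval_cases d <;> rfl

lemma pvDigA_reverse (d : Int) (h0 : 0 ≤ d) (h16 : d < 16) : (pvDigA d).reverse = pvDigA d := by
  interval_cases d <;> rfl

lemma pvTransferLoop_zero (n : Int) (fuel : Nat) (s : List Char) :
    pvTransferLoop n fuel 0 s = s := by
  cases fuel <;> simp [pvTransferLoop]

lemma pvTransferLoop_append (n : Int) (fuel : Nat) :
    ∀ (k : Int) (s : List Char), pvTransferLoop n fuel k s = s ++ pvTransferLoop n fuel k [] := by
  induction fuel with
  | zero => intro k s; simp [pvTransferLoop]
  | succ f ih =>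
    intro k s
    by_cases hk : k = 0
    · simp [pvTransferLoop, hk]
    · simp only [pvTransferLoop, if_neg hk]
      rw [ih (PySem.Int.floordiv k n) (s ++ pvDigA (PySem.Int.mod k n)),
          ih (PySem.Int.floordiv k n) ([] ++ pvDigA (PySem.Int.mod k n))]
      simp

lemma pvFloordiv_facts {n k : Int} (hn : 2 ≤ n) (hk : 1 ≤ k) :
    0 ≤ PySem.Int.floordiv k n ∧ PySem.Int.floordiv k n < k := by
  have h0 : (0:Int) < n := by omega
  constructor
  · rw [PySem.Int.floordiv_eq_ediv_of_pos h0]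
    exact Int.ediv_nonneg (by omega) (by omega)
  · rw [PySem.Int.floordiv_lt_iff_lt_mul h0]
    nlinarith

lemma pvTransferLoop_fuel (n : Int) (hn : 2 ≤ n) :
    ∀ (kn : Nat) (k : Int) (fuel : Nat) (s : List Char), k.toNat = kn → 0 ≤ k → kn ≤ fuel →
      pvTransferLoop n fuel k s = pvTransferLoop n kn k s := by
  intro kn
  induction kn using Nat.strong_induction_on with
  | _ kn ih =>
    intro k fuel s hkn hk hfuel
    by_cases hk0 : k = 0
    · subst hk0; rw [pvTransferLoop_zero, pvTransferLoop_zero]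
    · obtain ⟨hd0, hdlt⟩ := pvFloordiv_facts hn (by omega : 1 ≤ k)
      obtain ⟨j, rfl⟩ : ∃ j, kn = j + 1 := ⟨kn - 1, by omega⟩
      obtain ⟨f, rfl⟩ : ∃ f, fuel = f + 1 := ⟨fuel - 1, by omega⟩
      simp only [pvTransferLoop, if_neg hk0]
      rw [ih (PySem.Int.floordiv k n).toNat (by omega) _ f _ rfl hd0 (by omega),
          ih (PySem.Int.floordiv k n).toNat (by omega) _ j _ rfl hd0 (by omega)]

lemma pvModn_facts {n k : Int} (hn : 2 ≤ n) (hk : 0 ≤ k) :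
    0 ≤ PySem.Int.mod k n ∧ PySem.Int.mod k n < n := by
  exact ⟨PySem.Int.mod_nonneg k (by omega), PySem.Int.mod_lt k (by omega)⟩

lemma pvModn_small {n k : Int} (hn : 0 < n) (hk : 0 ≤ k) (hlt : k < n) :
    PySem.Int.mod k n = k := by
  rw [PySem.Int.mod_eq_emod_of_pos hn]; exact Int.emod_eq_of_lt hk hlt

lemma pvDigitsB_small {n k : Int} (hlt : k < n) (fuel : Nat) :
    pvDigitsB n fuel k = pvDigB (PySem.Int.mod k n) := by
  cases fuel with
  | zero => rfl
  | succ f => simp [pvDigitsB, if_pos hlt]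

lemma pvMod16 {n k : Int} (hn : 2 ≤ n) (hnk : n ≤ k) (hdig : n ≤ 16 ∨ k ≤ 15)
    (hq1 : 1 ≤ PySem.Int.floordiv k n) (hmlt : PySem.Int.mod k n < n) :
    PySem.Int.mod k n < 16 := by
  rcases hdig with h | h
  · omega
  · have hid := PySem.Int.floordiv_mul_add_mod k n
    nlinarith

lemma pvTransferA_step {n : Int} (hn : 2 ≤ n) (k : Int) (hdig : n ≤ 16 ∨ k ≤ 15) (hnk : n ≤ k) :
    pvTransferA n k =
      pvTransferA n (PySem.Int.floordiv k n) ++ pvDigA (PySem.Int.mod k n) := by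
  have hk0 : k ≠ 0 := by omega
  have hq1 : 1 ≤ PySem.Int.floordiv k n :=
    (PySem.Int.le_floordiv_iff_mul_le (by omega : (0:Int) < n)).mpr (by nlinarith)
  obtain ⟨hd0, hdlt⟩ := pvFloordiv_facts hn (by omega : 1 ≤ k)
  obtain ⟨hm0, hmlt⟩ := pvModn_facts (k := k) hn (by omega)
  have hm16 : PySem.Int.mod k n < 16 := pvMod16 hn hnk hdig hq1 hmlt
  unfold pvTransferA
  rw [if_neg hk0, if_neg (by omega : ¬ PySem.Int.floordiv k n = 0)]
  obtain ⟨j, hj⟩ : ∃ j, k.toNat = j + 1 := ⟨k.toNat - 1, by omega⟩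
  rw [hj]
  simp only [pvTransferLoop, if_neg hk0]
  have hjle : (PySem.Int.floordiv k n).toNat ≤ j := by omega
  rw [pvTransferLoop_append n j (PySem.Int.floordiv k n) ([] ++ pvDigA (PySem.Int.mod k n)),
      List.nil_append, List.reverse_append,
      pvTransferLoop_fuel n hn (PySem.Int.floordiv k n).toNat _ j _ rfl hd0 hjle,
      pvDigA_reverse _ hm0 hm16]

lemma pvChunk_eq (n : Int) (hn : 2 ≤ n) :
    ∀ (kn : Nat) (k : Int) (fuel : Nat), (n ≤ 16 ∨ k ≤ 15) → k.toNat = kn → 0 ≤ k → kn ≤ fuel →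
      pvDigitsB n fuel k = pvTransferA n k := by
  intro kn
  induction kn using Nat.strong_induction_on with
  | _ kn ih =>
    intro k fuel hdig hkn hk hfuel
    by_cases hlt : k < n
    · have hk16 : k < 16 := by rcases hdig with h | h <;> omega
      rw [pvDigitsB_small hlt]
      by_cases hk0 : k = 0
      · subst hk0
        rw [pvModn_small (by omega) le_rfl (by omega)]
        rfl
      · rw [pvModn_small (by omega) hk hlt]
        unfold pvTransferA
        rw [if_neg hk0]
        obtain ⟨j, hj⟩ : ∃ j, k.toNat = j + 1 := ⟨k.toNat - 1, by omega⟩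
        rw [hj]
        simp only [pvTransferLoop, if_neg hk0]
        have hdz : PySem.Int.floordiv k n = 0 := by
          rw [PySem.Int.floordiv_eq_ediv_of_pos (by omega : (0:Int) < n)]
          exact Int.ediv_eq_zero_of_lt hk hlt
        rw [hdz, pvTransferLoop_zero, pvModn_small (by omega) hk hlt, List.nil_append,
            pvDigA_reverse k hk (by omega), pvDigA_eq_digB k hk (by omega)]
    · rw [not_lt] at hlt
      obtain ⟨hd0, hdlt⟩ := pvFloordiv_facts hn (by omega : 1 ≤ k)
      obtain ⟨hm0, hmlt⟩ := pvModn_facts hn hk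
      obtain ⟨f, rfl⟩ : ∃ f, fuel = f + 1 := ⟨fuel - 1, by omega⟩
      have hq1 : 1 ≤ PySem.Int.floordiv k n :=
        (PySem.Int.le_floordiv_iff_mul_le (by omega : (0:Int) < n)).mpr (by nlinarith)
      have hm16 : PySem.Int.mod k n < 16 := pvMod16 hn hlt hdig hq1 hmlt
      simp only [pvDigitsB, if_neg (by omega : ¬ k < n)]
      rw [ih (PySem.Int.floordiv k n).toNat (by omega) _ f
            (by rcases hdig with h | h; exacts [Or.inl h, Or.inr (by omega)])
            rfl hd0 (by omega),
          pvTransferA_step hn k hdig hlt, pvDigA_eq_digB _ hm0 hm16]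

lemma pvSel_append (q m : Int) (xs : List Char) :
    ∀ (ys : List Char) (pos : Int),
      pvSel q m (xs ++ ys) pos = pvSel q m xs pos ++ pvSel q m ys (pos + xs.length) := by
  induction xs with
  | nil => intro ys pos; simp [pvSel]
  | cons c cs ihc =>
    intro ys pos
    have harith : pos + 1 + (cs.length : Int) = pos + ((cs.length : Int) + 1) := by ring
    simp [pvSel, ihc, harith, List.append_assoc]

lemma pvRange_snoc (q m N : Int) (hm : 0 < m) (hq : 0 ≤ q) :
    PySem.List.pyRange q (N + 1) m =
      PySem.List.pyRange q N m ++
        (if q ≤ N ∧ PySem.Int.mod (N - q) m = 0 then [N] else []) := by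
  have hmne : m ≠ 0 := by omega
  rw [PySem.List.pyRange_of_pos _ _ hm, PySem.List.pyRange_of_pos _ _ hm]
  by_cases h1 : q ≤ N
  · rw [if_pos (by omega : q < N + 1)]
    by_cases h2 : q < N
    · rw [if_pos h2]
      by_cases hdvd : PySem.Int.mod (N - q) m = 0
      · rw [if_pos ⟨h1, hdvd⟩]
        obtain ⟨a, ha⟩ := (PySem.Int.mod_eq_zero_iff_dvd _ _).mp hdvd
        have ha1 : 1 ≤ a := by nlinarith
        have hc1 : (N - q + m - 1) / m = a := by
          rw [show N - q + m - 1 = (m - 1) + a * m from by linear_combination ha,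
              Int.add_mul_ediv_right _ _ hmne,
              Int.ediv_eq_zero_of_lt (by omega) (by omega), zero_add]
        have hc2 : (N + 1 - q + m - 1) / m = a + 1 := by
          rw [show N + 1 - q + m - 1 = 0 + (a + 1) * m from by linear_combination ha,
              Int.add_mul_ediv_right _ _ hmne, Int.zero_ediv, zero_add]
        rw [hc1, hc2, show (a + 1).toNat = a.toNat + 1 by omega, List.range_succ,
            List.map_append]
        congr 1
        simp only [List.map_cons, List.map_nil]
        congr 1
        have : ((a.toNat : Nat) : Int) = a := by omega
        rw [this]
        omega
      · rw [if_neg (by tauto)]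
        have key : m * ((N - q) / m) + (N - q) % m = N - q := Int.ediv_add_emod _ _
        have hr0 : 0 ≤ (N - q) % m := Int.emod_nonneg _ hmne
        have hrm : (N - q) % m < m := Int.emod_lt_of_pos _ hm
        have hrne : (N - q) % m ≠ 0 := by
          intro h; exact hdvd (by rw [PySem.Int.mod_eq_emod_of_pos hm, h])
        have hz1 : ((N - q) % m) / m = 0 :=
          Int.ediv_eq_zero_of_lt (by omega) (by omega)
        have hz2 : ((N - q) % m - 1) / m = 0 :=
          Int.ediv_eq_zero_of_lt (by omega) (by omega)
        have hc : (N + 1 - q + m - 1) / m = (N - q + m - 1) / m := by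
          rw [show N + 1 - q + m - 1 = ((N - q) % m) + ((N - q) / m + 1) * m from by
                linear_combination (-1 : Int) * key,
              show N - q + m - 1 = ((N - q) % m - 1) + ((N - q) / m + 1) * m from by
                linear_combination (-1 : Int) * key,
              Int.add_mul_ediv_right _ _ hmne, Int.add_mul_ediv_right _ _ hmne, hz1, hz2]
        rw [hc, List.append_nil]
    · have hqN : q = N := by omega
      have hz : PySem.Int.mod (N - q) m = 0 := by
        rw [hqN, sub_self, PySem.Int.mod_eq_emod_of_pos hm, Int.zero_emod]
      rw [if_pos (show q ≤ N ∧ PySem.Int.mod (N - q) m = 0 from ⟨h1, hz⟩),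
          if_neg (by omega : ¬ q < N)]
      have hc : (N + 1 - q + m - 1) / m = 1 := by
        rw [show N + 1 - q + m - 1 = m by omega, Int.ediv_self hmne]
      rw [hc]
      simp only [Int.toNat_one, List.range_one, List.map_cons, List.map_nil,
        List.range_zero, List.nil_append, Nat.cast_zero, mul_zero, add_zero]
      rw [hqN]
  · rw [if_neg (by omega : ¬ q < N + 1), if_neg (by omega : ¬ q < N),
        if_neg (by intro h; exact h1 h.1)]
    simp

lemma pvSelA (q m : Int) (hm : 0 < m) (hq : 0 ≤ q) (L : List Char) :
    (PySem.List.pyRange q (L.length : Int) m).flatMap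
        (fun j => (match PySem.List.pyGet? L j with
                   | some c => [c]
                   | none => [])) = pvSel q m L 0 := by
  induction L using List.reverseRecOn with
  | nil =>
    rw [PySem.List.pyRange_of_pos _ _ hm]
    simp only [List.length_nil, Nat.cast_zero]
    rw [if_neg (by omega : ¬ q < (0:Int))]
    simp [pvSel]
  | append_singleton L c ih =>
    have hlen : (((L ++ [c]).length : Nat) : Int) = (L.length : Int) + 1 := by
      simp
    rw [hlen, pvRange_snoc q m (L.length : Int) hm hq, List.flatMap_append,
        pvSel_append q m L [c] 0]
    have h1 : (PySem.List.pyRange q (L.length : Int) m).flatMap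
        (fun j => (match PySem.List.pyGet? (L ++ [c]) j with
                   | some c => [c]
                   | none => [])) = pvSel q m L 0 := by
      rw [← ih]
      apply List.flatMap_congr
      intro j hj
      obtain ⟨hj1, hj2, _⟩ := (PySem.List.mem_pyRange_iff_of_pos hm j).mp hj
      have h0j : (0:Int) ≤ j := le_trans hq hj1
      rw [PySem.List.pyGet?_of_nonneg _ h0j, PySem.List.pyGet?_of_nonneg _ h0j,
          List.getElem?_append_left (by omega : j.toNat < L.length)]
    rw [h1]
    congr 1
    have hget : PySem.List.pyGet? (L ++ [c]) ((L.length : Nat) : Int) = some c := by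
      rw [PySem.List.pyGet?_natCast]
      exact List.getElem?_concat_length
    by_cases hcond : q ≤ (L.length : Int) ∧
        PySem.Int.mod ((L.length : Int) - q) m = 0
    · rw [if_pos hcond]
      simp only [pvSel, List.flatMap_cons, List.flatMap_nil, List.append_nil, zero_add]
      rw [if_pos hcond, hget]
    · rw [if_neg hcond]
      simp only [pvSel, List.flatMap_nil, List.append_nil, zero_add]
      rw [if_neg hcond]

lemma pvConsume_spec (t q m : Int) (ht : 1 ≤ t) :
    ∀ (xs res : List Char) (pos : Int), (res.length : Int) < t →
      pvConsume t q m xs res pos =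
        if (t ≤ (res.length : Int) + ((pvSel q m xs pos).length : Int)) then
          Sum.inl ((res ++ pvSel q m xs pos).take t.toNat)
        else Sum.inr (res ++ pvSel q m xs pos, pos + xs.length) := by
  intro xs
  induction xs with
  | nil =>
    intro res pos hres
    simp only [pvConsume, pvSel, List.length_nil, Nat.cast_zero, add_zero,
      List.append_nil]
    rw [if_neg (by omega)]
  | cons c cs ih =>
    intro res pos hres
    simp only [pvConsume, pvSel]
    by_cases hc : q ≤ pos ∧ PySem.Int.mod (pos - q) m = 0
    · rw [if_pos hc, if_pos hc]
      simp only [List.singleton_append]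
      by_cases hfull : (res.length : Int) + 1 = t
      · rw [if_pos hfull,
            if_pos (by simp only [List.length_cons]; push_cast; omega),
            show res ++ c :: pvSel q m cs (pos + 1)
               = (res ++ [c]) ++ pvSel q m cs (pos + 1) by simp,
            List.take_left' (by simp; omega)]
      · rw [if_neg hfull, ih (res ++ [c]) (pos + 1) (by simp; omega)]
        split_ifs with h1 h2 h2
        · simp [List.append_assoc]
        · exfalso
          simp only [List.length_append, List.length_cons, List.length_nil] at h1 h2
          push_cast at h1 h2
          omega
        · exfalso
          simp only [List.length_append, List.length_cons, List.length_nil] at h1 h2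
          push_cast at h1 h2
          omega
        · simp only [List.append_assoc, List.singleton_append, Sum.inr.injEq,
            Prod.mk.injEq, true_and, List.length_cons]
          push_cast
          ring
    · rw [if_neg hc, if_neg hc, ih res (pos + 1) hres]
      simp only [List.nil_append, List.length_cons]
      split_ifs with h1
      · rfl
      · simp only [Sum.inr.injEq, Prod.mk.injEq, true_and]
        push_cast
        ring

lemma pvConsume_append (t q m : Int) :
    ∀ (xs ys res : List Char) (pos : Int),
      pvConsume t q m (xs ++ ys) res pos =
        match pvConsume t q m xs res pos with
        | Sum.inl f => Sum.inl f
        | Sum.inr (r, pp) => pvConsume t q m ys r pp := by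
  intro xs
  induction xs with
  | nil => intro ys res pos; simp [pvConsume]
  | cons c cs ih =>
    intro ys res pos
    simp only [List.cons_append, pvConsume]
    split_ifs with h1 h2
    · rfl
    · exact ih ys (res ++ [c]) (pos + 1)
    · exact ih ys res (pos + 1)

lemma pvStream_concat (n t q m : Int) :
    ∀ (fuel : Nat) (i : Int) (res : List Char) (pos : Int),
      pvStream n t q m fuel i res pos =
        match pvConsume t q m (pvChunks n fuel i) res pos with
        | Sum.inl f => f
        | Sum.inr (r, _) => r := by
  intro fuel
  induction fuel with
  | zero => intro i res pos; simp [pvStream, pvChunks, pvConsume]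
  | succ f ih =>
    intro i res pos
    simp only [pvStream, pvChunks]
    rw [pvConsume_append]
    cases h : pvConsume t q m (pvDigitsB n i.toNat i) res pos with
    | inl fl => rfl
    | inr rp =>
      obtain ⟨r, pp⟩ := rp
      exact ih (i + 1) r pp

lemma pvChunks_eq_flatMap (n : Int) (hn : 2 ≤ n) :
    ∀ (fuel : Nat) (i : Int), (n ≤ 16 ∨ i + (fuel : Int) ≤ 16) → 0 ≤ i →
      pvChunks n fuel i =
        (PySem.List.pyRange i (i + (fuel : Int)) 1).flatMap (fun j => pvTransferA n j) := by
  intro fuel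
  induction fuel with
  | zero =>
    intro i _ hi
    rw [PySem.List.pyRange_one_eq_nil (by omega)]
    rfl
  | succ f ih =>
    intro i hbd hi
    have hcons : PySem.List.pyRange i (i + ((f : Nat) + 1 : Nat)) 1
        = i :: PySem.List.pyRange (i + 1) (i + ((f : Nat) + 1 : Nat)) 1 :=
      PySem.List.pyRange_one_cons (by push_cast; omega)
    rw [hcons]
    simp only [List.flatMap_cons, pvChunks]
    congr 1
    · refine pvChunk_eq n hn i.toNat i i.toNat ?_ rfl hi le_rfl
      rcases hbd with h | h
      · exact Or.inl h
      · right; push_cast at h; omega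
    · rw [ih (i + 1) (by
          rcases hbd with h | h
          exacts [Or.inl h, Or.inr (by push_cast at h ⊢; omega)]) (by omega)]
      congr 1
      congr 1
      push_cast
      ring

-- ===== VERDICT (by name: the statement is the Claim_ definition above) =====
theorem solution_spec : Claim_equal_solution := by
  intro n t m p hdom hpre
  show solution n t m p = solution_alt n t m p
  simp only [solution, solution_alt]
  rcases hpre with ⟨ht1, hn2, hm1, hp1, hdig⟩ | ⟨ht1, hmneg, hp1⟩ | ⟨ht0, hcase⟩ |
    ⟨htneg, hcase⟩
  · -- 1 ≤ t, 1 ≤ m : the real case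
    have hm0 : (0:Int) < m := by omega
    have hKnn : 0 ≤ t * m := mul_nonneg (by omega) (by omega)
    rw [if_neg (by omega : ¬ t ≤ 0)]
    rw [PySem.List.foldl_append_eq_flatMap, PySem.List.foldl_append_eq_flatMap]
    simp only [List.nil_append, PySem.List.len_eq]
    rw [pvSelA (p - 1) m hm0 (by omega),
        PySem.List.slice_to _ (by omega : (0:Int) ≤ t),
        pvStream_concat,
        pvChunks_eq_flatMap n hn2 _ 0
          (by rcases hdig with h | h
              · exact Or.inl h
              · right; push_cast; omega) le_rfl,
        show (0:Int) + (((t * m + 1).toNat : Nat) : Int) = t * m + 1 from by omega,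
        show List.flatMap (fun j => pvTransferA n j) (PySem.List.pyRange 0 (t * m + 1) 1)
           = List.flatMap (pvTransferA n) (PySem.List.pyRange 0 (t * m + 1) 1) from rfl,
        pvConsume_spec t (p - 1) m (by omega) _ [] 0 (by simp; omega)]
    split_ifs with hfit
    · simp only [List.nil_append]
    · simp only [List.nil_append] at hfit ⊢
      rw [List.take_of_length_le (by simp at hfit ⊢; omega)]
  · -- 1 ≤ t, m ≤ -1, p ≤ 1 : loop is empty, both sides return ""
    have hK : t * m + 1 ≤ 0 := by
      have h := mul_le_mul_of_nonneg_left (show m ≤ -1 by omega)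
        (show (0:Int) ≤ t by omega)
      linarith
    rw [if_neg (by omega : ¬ t ≤ 0),
        show (t * m + 1).toNat = 0 from by omega]
    rw [PySem.List.pyRange_one_eq_nil (by omega)]
    simp only [List.foldl_nil, PySem.List.len_eq, List.length_nil, Nat.cast_zero]
    have hrange : PySem.List.pyRange (p - 1) 0 m = [] := by
      simp only [PySem.List.pyRange]
      rw [if_neg (by omega : ¬ m = 0),
          if_neg (by omega : ¬ (0:Int) < m),
          if_neg (by omega : ¬ (0:Int) < p - 1)]
      simp
    rw [hrange]
    simp only [List.foldl_nil]
    rw [PySem.List.slice_to _ (by omega : (0:Int) ≤ t)]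
    simp [pvStream]
  · -- t = 0 : A slices the (whatever) result string to length 0
    subst ht0
    rw [if_pos le_rfl, PySem.List.slice_to _ (by omega : (0:Int) ≤ 0)]
    simp
  · -- t < 0 : the stride range is empty, A returns ""
    rw [if_pos (by omega : t ≤ 0)]
    rcases hcase with ⟨hm1, hp1⟩ | ⟨hmneg, hp1, _, _⟩
    · have hK : t * m + 1 ≤ 0 := by
        have h := mul_le_mul_of_nonneg_right (show t ≤ -1 by omega)
          (show (0:Int) ≤ m by omega)
        linarith
      rw [PySem.List.pyRange_one_eq_nil (by omega)]
      simp only [List.foldl_nil, PySem.List.len_eq, List.length_nil, Nat.cast_zero]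
      rw [PySem.List.pyRange_of_pos _ _ (by omega : (0:Int) < m),
          if_neg (by omega : ¬ p - 1 < (0:Int))]
      simp only [List.range_zero, List.map_nil, List.foldl_nil]
      simp [PySem.List.slice]
    · -- m ≤ -1, p ≤ 1 : a descending range that starts at or below 0 is empty
      have hrange : ∀ (L : List Char),
          PySem.List.pyRange (p - 1) (PySem.List.len L) m = [] := by
        intro L
        rw [PySem.List.len_eq]
        simp only [PySem.List.pyRange]
        rw [if_neg (by omega : ¬ m = 0)]
        rw [if_neg (by omega : ¬ (0:Int) < m),
            if_neg (by omega : ¬ (L.length : Int) < p - 1)]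
        simp
      rw [hrange]
      simp only [List.foldl_nil]
      simp [PySem.List.slice]
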